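-- pv_equiv track=rewrite | github.com/pylesharley/protein_mineral_library | identify_enriched_sequences/03_predict_CDS.py | gap_free_alignment
-- ===== SOURCE A (Python) =====
-- def gap_free_alignment(design, read):
--     best_alignment = None
--     best_score = 0
--
--     for shift in range(0,len(design)):
--         alignment = '-'*shift + read
--
--         score = 0
--         for d, r in zip(design, alignment):
--             if r == d:
--                 score += 1
--         if score > best_score:
--             best_alignment = alignment
--             best_score = score
--     return best_alignment
-- ===== SOURCE B (Python) =====
-- def gap_free_alignment(design, read):
--     # Cross-correlation by character index: scatter matches into per-shift
--     # counters, then one argmax pass (padding '-' matches via a dash prefix count).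
--     n = len(design)
--     pos = {}
--     for j, c in enumerate(design):
--         pos.setdefault(c, []).append(j)
--     counts = {}
--     for i, c in enumerate(read):
--         for j in pos.get(c, []):
--             if i <= j:
--                 counts[j - i] = counts.get(j - i, 0) + 1
--     best_shift = -1
--     best_score = 0
--     dash = 0
--     for s in range(n):
--         total = counts.get(s, 0) + dash
--         if total > best_score:
--             best_shift = s
--             best_score = total
--         if design[s] == '-':
--             dash += 1
--     if best_shift < 0:
--         return None
--     return '-' * best_shift + read
-- ===== Notes on version B (the rewrite author's own statement) =====
-- stated objective: faster
-- what changed: Replaces the per-shift string build + zip scan with a character-indexed cross-correlation: positions of each design character are indexed once, matches are scattered into per-shift counters, and one argmax pass (with a running dash-prefix count for the padding) picks the first best shift.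
import Mathlib
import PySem

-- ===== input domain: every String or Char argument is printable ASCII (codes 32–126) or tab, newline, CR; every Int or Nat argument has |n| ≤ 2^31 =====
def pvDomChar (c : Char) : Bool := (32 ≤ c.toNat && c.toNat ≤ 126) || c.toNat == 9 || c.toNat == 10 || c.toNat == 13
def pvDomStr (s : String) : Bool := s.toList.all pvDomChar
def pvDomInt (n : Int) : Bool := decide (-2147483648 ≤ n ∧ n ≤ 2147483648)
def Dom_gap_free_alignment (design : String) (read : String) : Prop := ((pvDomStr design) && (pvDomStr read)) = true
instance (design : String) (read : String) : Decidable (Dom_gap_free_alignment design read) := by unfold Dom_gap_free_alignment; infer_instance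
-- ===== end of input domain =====

-- B replaces A's per-shift string build + zip scan by a character-position index,
-- a scatter of matches into per-shift counters and one argmax pass (faster).

-- ===== PORT A =====
def gap_free_alignment (design : String) (read : String) : Option String :=
  let d := design.toList
  let r := read.toList
  let res := (PySem.List.pyRange 0 (PySem.Str.len design) 1).foldl
    (fun (st : Option (List Char) × Int) shift =>
      let alignment := PySem.List.pyRepeat ['-'] shift ++ r
      let score := (List.zip d alignment).foldl
        (fun sc p => if p.2 == p.1 then sc + 1 else sc) (0 : Int)
      if score > st.2 then (some alignment, score) else st)
    (none, 0)
  res.1.map String.ofList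

-- ===== PORT B =====
-- B-side loop helpers (named so the proofs can speak about them)
def pvPosDict (d : List Char) : PySem.Dict Char (List Int) :=
  (PySem.List.enumerate d 0).foldl
    (fun (pos : PySem.Dict Char (List Int)) jc =>
      pos.insert jc.2 (pos.getD jc.2 [] ++ [jc.1])) PySem.Dict.empty

def pvCountsDict (d r : List Char) : PySem.Dict Int Int :=
  (PySem.List.enumerate r 0).foldl
    (fun (cnt : PySem.Dict Int Int) ic =>
      ((pvPosDict d).getD ic.2 []).foldl
        (fun cnt j =>
          if ic.1 ≤ j then cnt.insert (j - ic.1) (cnt.getD (j - ic.1) 0 + 1) else cnt)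
        cnt) PySem.Dict.empty

def gap_free_alignment_alt (design : String) (read : String) : Option String :=
  let d := design.toList
  let r := read.toList
  let n : Int := PySem.Str.len design
  -- pos: for j, c in enumerate(design): pos.setdefault(c, []).append(j)
  -- counts: for i, c in enumerate(read): for j in pos.get(c, []): if i <= j: counts[j-i] = counts.get(j-i,0)+1
  let counts := pvCountsDict d r
  -- selection pass: state (best_shift, best_score, dash)
  let sel := (PySem.List.pyRange 0 n 1).foldl
    (fun (st : Int × Int × Int) s =>
      let total := counts.getD s 0 + st.2.2
      let st' := if total > st.2.1 then (s, total, st.2.2) else st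
      if PySem.List.pyGetD d s ' ' == '-' then (st'.1, st'.2.1, st'.2.2 + 1) else st')
    (-1, 0, 0)
  if sel.1 ≥ 0 then some (String.ofList (PySem.List.pyRepeat ['-'] sel.1 ++ r)) else none

-- ===== PRECONDITION & SPEC =====
def Spec_gap_free_alignment (design : String) (read : String) (out : Option String) : Prop := out = gap_free_alignment_alt design read
instance (design : String) (read : String) (out : Option String) : Decidable (Spec_gap_free_alignment design read out) := by unfold Spec_gap_free_alignment; infer_instance

-- ===== CLAIM (what is proved, stated in full; the proofs are below) =====
def Claim_equal_gap_free_alignment : Prop := ∀ (design : String) (read : String), Dom_gap_free_alignment design read → Spec_gap_free_alignment design read (gap_free_alignment design read)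

-- ===== LEMMAS AND PROOFS =====

theorem pv_pos_getD (l : List (Int × Char)) (p0 : PySem.Dict Char (List Int)) (c : Char) :
    (l.foldl (fun pos jc => pos.insert jc.2 (pos.getD jc.2 [] ++ [jc.1])) p0).getD c []
      = p0.getD c [] ++ (l.filter (fun jc => jc.2 == c)).map (·.1) := by
  induction l generalizing p0 with
  | nil => simp
  | cons x t ih =>
    simp only [List.foldl_cons, List.filter_cons, ih]
    rw [PySem.Dict.getD_insert]
    by_cases h : c = x.2
    · simp [h]
    · rw [if_neg h]
      have hb : (x.2 == c) = false := by simp; exact fun hh => h hh.symm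
      simp [hb]

theorem pv_inner (js : List Int) (cnt : PySem.Dict Int Int) (i v : Int) :
    (js.foldl (fun cnt j => if i ≤ j then cnt.insert (j - i) (cnt.getD (j - i) 0 + 1) else cnt) cnt).getD v 0
      = cnt.getD v 0 + (js.countP (fun j => decide (i ≤ j ∧ j - i = v)) : Int) := by
  induction js generalizing cnt with
  | nil => simp
  | cons j t ih =>
    simp only [List.foldl_cons, List.countP_cons, ih]
    by_cases hij : i ≤ j
    · rw [if_pos hij, PySem.Dict.getD_insert]
      by_cases hv : j - i = v
      · simp [hv, hij]; omega
      · rw [if_neg (fun hh => hv hh.symm)]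
        simp [hv, hij]
    · rw [if_neg hij]
      simp [hij]

theorem pv_counts_getD (pos : PySem.Dict Char (List Int)) (l : List (Int × Char))
    (cnt0 : PySem.Dict Int Int) (v : Int) :
    (l.foldl (fun cnt ic =>
        ((pos.getD ic.2 []).foldl
          (fun cnt j => if ic.1 ≤ j then cnt.insert (j - ic.1) (cnt.getD (j - ic.1) 0 + 1) else cnt)
          cnt)) cnt0).getD v 0
      = cnt0.getD v 0
        + (l.map (fun ic => ((pos.getD ic.2 []).countP (fun j => decide (ic.1 ≤ j ∧ j - ic.1 = v)) : Int))).sum := by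
  induction l generalizing cnt0 with
  | nil => simp
  | cons x t ih =>
    simp only [List.foldl_cons, List.map_cons, List.sum_cons, ih, pv_inner]
    ring

theorem pv_countP_eq_count (js : List Int) (i v : Int) (hv : 0 ≤ v) :
    js.countP (fun j => decide (i ≤ j ∧ j - i = v)) = js.count (i + v) := by
  unfold List.count
  apply List.countP_congr
  intro j _
  have h : (i ≤ j ∧ j - i = v) ↔ j = i + v := by omega
  simp [h]

theorem pv_idx_count (d : List Char) (c : Char) (k : Int) :
    ((((PySem.List.enumerate d 0).filter (fun jc => jc.2 == c)).map (·.1)).count k)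
      = if 0 ≤ k ∧ k < (d.length : Int) ∧ PySem.List.pyGetD d k ' ' = c then 1 else 0 := by
  rw [PySem.List.enumerate_eq_map_pyRange d ' ']
  rw [List.filter_map, List.map_map]
  have hmap : ((·.1) ∘ fun j => ((j : Int), PySem.List.pyGetD d j ' ')) = id := by
    funext j; rfl
  rw [hmap, List.map_id]
  change List.count k (List.filter (fun j => PySem.List.pyGetD d j ' ' == c)
      (PySem.List.pyRange 0 (PySem.List.len d))) = _
  by_cases hp : (PySem.List.pyGetD d k ' ' == c) = true
  · rw [List.count_filter (p := fun j => PySem.List.pyGetD d j ' ' == c) hp]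
    simp only [beq_iff_eq] at hp
    have hnd := PySem.List.nodup_pyRange_one 0 (PySem.List.len d)
    by_cases hm : k ∈ PySem.List.pyRange 0 (PySem.List.len d)
    · rw [List.count_eq_one_of_mem hnd hm]
      rw [PySem.List.mem_pyRange_one] at hm
      rw [if_pos ⟨hm.1, by simpa using hm.2, hp⟩]
    · rw [List.count_eq_zero_of_not_mem hm]
      rw [PySem.List.mem_pyRange_one] at hm
      rw [if_neg]
      intro ⟨h0, h1, _⟩
      exact hm ⟨h0, by simpa using h1⟩
  · have hnot : k ∉ List.filter (fun j => PySem.List.pyGetD d j ' ' == c)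
        (PySem.List.pyRange 0 (PySem.List.len d)) := by
      intro hmem
      exact hp (List.of_mem_filter (p := fun j => PySem.List.pyGetD d j ' ' == c) hmem)
    rw [List.count_eq_zero_of_not_mem hnot]
    simp only [beq_iff_eq] at hp
    rw [if_neg (fun h => hp h.2.2)]

theorem pv_counts_eq (d r : List Char) (s : Nat) :
    (pvCountsDict d r).getD (s : Int) 0
      = ((List.range r.length).countP
          (fun i => decide (s + i < d.length) && (d.getD (s + i) ' ' == r.getD i ' ')) : Int) := by
  unfold pvCountsDict
  rw [pv_counts_getD]
  have hempty : (PySem.Dict.empty : PySem.Dict Int Int).getD (s : Int) 0 = 0 := by simp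
  rw [hempty, zero_add]
  rw [PySem.List.enumerate_eq_map_pyRange r ' ', List.map_map]
  rw [PySem.List.pyRange_one, List.map_map]
  have hlen : ((PySem.List.len r : Int) - 0).toNat = r.length := by simp
  rw [hlen]
  rw [List.map_congr_left (l := List.range r.length)
    (g := fun i : Nat => if (decide (s + i < d.length) && (d.getD (s + i) ' ' == r.getD i ' ')) then (1:Int) else 0) ?_]
  · rw [PySem.List.sum_map_ite_one_zero]
  · intro i hi
    simp only [List.mem_range] at hi
    show (((pvPosDict d).getD (PySem.List.pyGetD r (0 + (i:Int)) ' ') []).countP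
        (fun j => decide ((0 + (i:Int)) ≤ j ∧ j - (0 + (i:Int)) = (s:Int))) : Int) = _
    have h0 : (0 + (i:Int)) = (i:Int) := by ring
    rw [h0]
    have hr : PySem.List.pyGetD r (i:Int) ' ' = r.getD i ' ' := by
      rw [PySem.List.pyGetD_of_nonneg r ' ' (by positivity)]
      simp
    unfold pvPosDict
    rw [pv_pos_getD]
    have hpe : (PySem.Dict.empty : PySem.Dict Char (List Int)).getD (PySem.List.pyGetD r (i:Int) ' ') [] = [] := by simp
    rw [hpe, List.nil_append]
    rw [pv_countP_eq_count _ _ _ (by positivity)]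
    rw [pv_idx_count]
    rw [hr]
    have hget : PySem.List.pyGetD d ((i:Int) + (s:Int)) ' ' = d.getD (s + i) ' ' := by
      rw [PySem.List.pyGetD_of_nonneg d ' ' (by positivity)]
      have h2 : ((i:Int) + (s:Int)).toNat = s + i := by omega
      rw [h2]
    rw [hget]
    have hPb : (0 ≤ (i:Int) + (s:Int) ∧ (i:Int) + (s:Int) < (d.length:Int) ∧ d.getD (s + i) ' ' = r.getD i ' ')
        ↔ ((decide (s + i < d.length) && (d.getD (s + i) ' ' == r.getD i ' ')) = true) := by
      simp only [Bool.and_eq_true, decide_eq_true_eq, beq_iff_eq]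
      constructor
      · rintro ⟨_, h2, h3⟩
        exact ⟨by omega, h3⟩
      · rintro ⟨h2, h3⟩
        exact ⟨by positivity, by omega, h3⟩
    show ((if _ then (1:Nat) else 0 : Nat) : Int) = (if (decide (s + i < d.length) && (d.getD (s + i) ' ' == r.getD i ' ')) = true then (1:Int) else 0)
    rw [if_congr hPb rfl rfl]
    split_ifs <;> simp

theorem pv_zip_rep (l : List Char) :
    List.countP (fun p => p.2 == p.1) (l.zip (List.replicate l.length '-')) = l.count '-' := by
  induction l with
  | nil => simp
  | cons x t ih =>
    simp only [List.length_cons, List.replicate_succ, List.zip_cons_cons, List.countP_cons,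
      List.count_cons, ih]
    by_cases h : x = '-'
    · simp [h]
    · have h1 : (('-' : Char) == x) = false := by simp; exact fun hh => h hh.symm
      have h2 : (x == '-') = false := by simp [h]
      simp [h1, h2]

theorem pv_zip_drop (r d : List Char) (t : Nat) :
    List.countP (fun p => p.2 == p.1) ((d.drop t).zip r)
      = (List.range r.length).countP
          (fun i => decide (t + i < d.length) && (d.getD (t + i) ' ' == r.getD i ' ')) := by
  induction r generalizing t with
  | nil => simp
  | cons c r' ih =>
    by_cases h : t < d.length
    · rw [List.drop_eq_getElem_cons h]
      simp only [List.zip_cons_cons, List.countP_cons, List.length_cons,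
        List.range_succ_eq_map, List.countP_map]
      have harith : ∀ i : Nat, t + (i + 1) = (t + 1) + i := by omega
      have hcong : (List.range r'.length).countP
            ((fun i => decide (t + i < d.length) && (d.getD (t + i) ' ' == (c :: r').getD i ' ')) ∘ Nat.succ)
          = (List.range r'.length).countP
            (fun i => decide ((t+1) + i < d.length) && (d.getD ((t+1) + i) ' ' == r'.getD i ' ')) := by
        apply List.countP_congr
        intro i _
        simp [Function.comp, harith i]
      rw [hcong, ← ih (t+1)]
      have hd : d.getD (t + 0) ' ' = d[t] := by
        simp [List.getD, List.getElem?_eq_getElem h]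
      by_cases hc : c = d[t]
      · simp [hc, h]
      · have h1 : (c == d[t]) = false := by simp [hc]
        have h2 : (d[t] == c) = false := by simp; exact fun hh => hc hh.symm
        simp [h1, h2, h]
    · have hnil : d.drop t = [] := by
        rw [List.drop_eq_nil_iff]; omega
      rw [hnil]
      simp only [List.zip_nil_left, List.countP_nil]
      symm
      rw [List.countP_eq_zero]
      intro i _
      simp; omega

theorem pv_score (d r : List Char) (s : Nat) (hs : s ≤ d.length) :
    (List.countP (fun p => p.2 == p.1) (d.zip (List.replicate s '-' ++ r)) : Int)
      = ((d.take s).count '-' : Int) + (pvCountsDict d r).getD (s : Int) 0 := by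
  conv_lhs => rw [← List.take_append_drop s d]
  rw [List.zip_append (by simp [hs])]
  rw [List.countP_append]
  have h1 : List.countP (fun p => p.2 == p.1) ((d.take s).zip (List.replicate s '-'))
      = (d.take s).count '-' := by
    have h := pv_zip_rep (d.take s)
    rw [List.length_take, Nat.min_eq_left hs] at h
    exact h
  rw [h1, pv_zip_drop r d s, pv_counts_eq]
  push_cast
  ring

theorem pv_sel (d r : List Char) (k : Nat) (hk : k ≤ d.length) :
    (fun (a : Option (List Char) × Int) (b : Int × Int × Int) =>
        a.2 = b.2.1
        ∧ b.2.2 = (((d.take k).count '-' : Nat) : Int)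
        ∧ a.1 = (if 0 ≤ b.1 then some (PySem.List.pyRepeat ['-'] b.1 ++ r) else none))
      ((PySem.List.pyRange 0 (k : Int) 1).foldl
        (fun (st : Option (List Char) × Int) shift =>
          let alignment := PySem.List.pyRepeat ['-'] shift ++ r
          let score := (List.zip d alignment).foldl
            (fun sc p => if p.2 == p.1 then sc + 1 else sc) (0 : Int)
          if score > st.2 then (some alignment, score) else st)
        (none, 0))
      ((PySem.List.pyRange 0 (k : Int) 1).foldl
        (fun (st : Int × Int × Int) s =>
          let total := (pvCountsDict d r).getD s 0 + st.2.2
          let st' := if total > st.2.1 then (s, total, st.2.2) else st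
          if PySem.List.pyGetD d s ' ' == '-' then (st'.1, st'.2.1, st'.2.2 + 1) else st')
        (-1, 0, 0)) := by
  induction k with
  | zero =>
    simp [PySem.List.pyRange_one_eq_nil]
  | succ k ih =>
    have hk' : k ≤ d.length := by omega
    have hklt : k < d.length := by omega
    obtain ⟨h1, h2, h3⟩ := ih hk'
    have hcast : ((k + 1 : Nat) : Int) = (k : Int) + 1 := by push_cast; ring
    rw [hcast, PySem.List.pyRange_one_succ_right (by positivity)]
    rw [List.foldl_append, List.foldl_append, List.foldl_cons, List.foldl_cons,
      List.foldl_nil, List.foldl_nil]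
    -- the single extra step
    set stA := (PySem.List.pyRange 0 (k : Int) 1).foldl
        (fun (st : Option (List Char) × Int) shift =>
          let alignment := PySem.List.pyRepeat ['-'] shift ++ r
          let score := (List.zip d alignment).foldl
            (fun sc p => if p.2 == p.1 then sc + 1 else sc) (0 : Int)
          if score > st.2 then (some alignment, score) else st)
        (none, 0) with hstA
    set stB := (PySem.List.pyRange 0 (k : Int) 1).foldl
        (fun (st : Int × Int × Int) s =>
          let total := (pvCountsDict d r).getD s 0 + st.2.2
          let st' := if total > st.2.1 then (s, total, st.2.2) else st
          if PySem.List.pyGetD d s ' ' == '-' then (st'.1, st'.2.1, st'.2.2 + 1) else st')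
        (-1, 0, 0) with hstB
    simp only []
    -- A's score at shift k equals B's counter + dash
    have hrep : PySem.List.pyRepeat ['-'] ((k : Nat) : Int) = List.replicate k '-' := by
      rw [PySem.List.pyRepeat_singleton, Int.toNat_natCast]
    have hscore : (List.zip d (PySem.List.pyRepeat ['-'] ((k : Nat) : Int) ++ r)).foldl
          (fun sc p => if p.2 == p.1 then sc + 1 else sc) (0 : Int)
        = (pvCountsDict d r).getD ((k : Nat) : Int) 0 + (((d.take k).count '-' : Nat) : Int) := by
      rw [PySem.List.foldl_if_add_one, hrep, zero_add, pv_score d r k hk']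
      ring
    have hgetk : PySem.List.pyGetD d ((k : Nat) : Int) ' ' = d[k] := by
      rw [PySem.List.pyGetD_of_nonneg d ' ' (by positivity), Int.toNat_natCast,
        List.getD_eq_getElem d ' ' hklt]
    have htake : (((d.take (k+1)).count '-' : Nat) : Int)
        = (((d.take k).count '-' : Nat) : Int) + (if d[k] = '-' then 1 else 0) := by
      rw [List.take_add_one, List.count_append]
      rw [List.getElem?_eq_getElem hklt]
      by_cases hck : d[k] = '-'
      · simp [hck]
      · simp [hck]
    rw [hscore, h2, hgetk, ← h1]
    by_cases hgt : (pvCountsDict d r).getD ((k : Nat) : Int) 0 + (((d.take k).count '-' : Nat) : Int) > stA.2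
    · simp only [if_pos hgt]
      by_cases hck : d[k] = '-'
      · have hb : (d[k] == '-') = true := by simp [hck]
        simp only [hb, if_true]
        refine ⟨?_, ?_, ?_⟩ <;> (try simp only [htake]) <;>
          first | rfl | trivial | simp [hck]
      · have hb : (d[k] == '-') = false := by simp [hck]
        simp only [hb, Bool.false_eq_true, if_false]
        refine ⟨?_, ?_, ?_⟩ <;> (try simp only [htake]) <;>
          first | rfl | trivial | simp [hck]
    · simp only [if_neg hgt]
      by_cases hck : d[k] = '-'
      · have hb : (d[k] == '-') = true := by simp [hck]
        simp only [hb, if_true]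
        refine ⟨?_, ?_, ?_⟩ <;> (try simp only [h2, htake]) <;>
          first | rfl | trivial | simp [hck]
      · have hb : (d[k] == '-') = false := by simp [hck]
        simp only [hb, Bool.false_eq_true, if_false]
        refine ⟨?_, ?_, ?_⟩ <;> (try simp only [h2, htake]) <;>
          first | rfl | trivial | simp [hck]

-- ===== VERDICT (by name: the statement is the Claim_ definition above) =====
theorem gap_free_alignment_spec : Claim_equal_gap_free_alignment := by
  unfold Claim_equal_gap_free_alignment Spec_gap_free_alignment
  intro design read _
  unfold gap_free_alignment gap_free_alignment_alt
  simp only [PySem.Str.len_eq]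
  obtain ⟨h1, h2, h3⟩ := pv_sel design.toList read.toList design.toList.length le_rfl
  rw [h3]
  split_ifs <;> simp_all
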